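-- pv_equiv track=rewrite | github.com/LSFleitas/Facultad | Python/Analizador-sintactico/Automatas/automataRelop.py | automata_Relop
-- ===== SOURCE A (Python) =====
-- TRAP_STATE = -1
--
-- RESULT_TRAP = "RESULT_TRAP"
--
-- RESULT_ACCEPTED = "RESULT_ACCEPTED"
--
-- RESULT_NOT_ACCEPTED = "RESULT_NOT_ACCEPTED"
--
-- def delta(state,caracter):
-- 	if state == 0 and ( caracter == ">" or caracter == "<" ):
-- 		return 1
-- 	if state == 0 and ( caracter == "=" or caracter == "!" ):
-- 		return 2
-- 	if state == 1 and caracter == "=":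
-- 		return 3
-- 	if state == 2 and caracter == "=":
-- 		return 3
-- 	return TRAP_STATE
--
-- def automata_Relop(input):
-- 	state = 0
-- 	final1 = 1
-- 	final2 = 3
--
-- 	for caracter in input:
-- 		next_state = delta(state, caracter)
-- 		state = next_state
--
-- 	if state == final1 or state == final2:
-- 		return RESULT_ACCEPTED
-- 	if state == TRAP_STATE:
-- 		return RESULT_TRAP
-- 	return RESULT_NOT_ACCEPTED
-- ===== SOURCE B (Python) =====
-- RESULT_TRAP = "RESULT_TRAP"
-- RESULT_ACCEPTED = "RESULT_ACCEPTED"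
-- RESULT_NOT_ACCEPTED = "RESULT_NOT_ACCEPTED"
--
-- ACCEPTED = [[">"], ["<"], [">", "="], ["<", "="], ["=", "="], ["!", "="]]
-- NOT_ACCEPTED = [[], ["="], ["!"]]
--
-- def automata_Relop(input):
--     chars = list(input)
--     if chars in ACCEPTED:
--         return RESULT_ACCEPTED
--     if chars in NOT_ACCEPTED:
--         return RESULT_NOT_ACCEPTED
--     return RESULT_TRAP
-- ===== Notes on version B (the rewrite author's own statement) =====
-- stated objective: simpler
-- what changed: Replaces the DFA state-transition simulation (delta walk over the input) with direct membership of the character list in two explicit finite tables of accepted / not-accepted words.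
import Mathlib
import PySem

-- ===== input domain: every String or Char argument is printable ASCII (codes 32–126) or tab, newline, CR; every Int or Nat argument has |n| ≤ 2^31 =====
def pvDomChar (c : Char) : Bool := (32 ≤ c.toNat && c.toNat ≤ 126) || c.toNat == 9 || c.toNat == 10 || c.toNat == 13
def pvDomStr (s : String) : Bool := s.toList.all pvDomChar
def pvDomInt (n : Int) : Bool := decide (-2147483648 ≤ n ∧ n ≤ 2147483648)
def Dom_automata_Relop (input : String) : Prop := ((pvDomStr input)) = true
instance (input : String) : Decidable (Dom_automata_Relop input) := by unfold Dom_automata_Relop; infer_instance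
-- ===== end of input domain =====

-- B replaces the DFA simulation with lookup of the char list in explicit finite word tables (simpler).

-- ===== PORT A =====
def delta (state : Int) (caracter : Char) : Int :=
  if state = 0 ∧ (caracter = '>' ∨ caracter = '<') then 1
  else if state = 0 ∧ (caracter = '=' ∨ caracter = '!') then 2
  else if state = 1 ∧ caracter = '=' then 3
  else if state = 2 ∧ caracter = '=' then 3
  else -1

def automata_Relop (input : String) : String :=
  let state := input.toList.foldl delta 0
  if state = 1 ∨ state = 3 then "RESULT_ACCEPTED"
  else if state = -1 then "RESULT_TRAP"
  else "RESULT_NOT_ACCEPTED"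

-- ===== PORT B =====
def automata_Relop_alt (input : String) : String :=
  let chars := input.toList
  if chars = ['>'] ∨ chars = ['<'] ∨ chars = ['>', '='] ∨ chars = ['<', '='] ∨
     chars = ['=', '='] ∨ chars = ['!', '='] then "RESULT_ACCEPTED"
  else if chars = [] ∨ chars = ['='] ∨ chars = ['!'] then "RESULT_NOT_ACCEPTED"
  else "RESULT_TRAP"

-- ===== PRECONDITION & SPEC =====
def Spec_automata_Relop (input : String) (out : String) : Prop := out = automata_Relop_alt input
instance (input : String) (out : String) : Decidable (Spec_automata_Relop input out) := by unfold Spec_automata_Relop; infer_instance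

-- ===== CLAIM (what is proved, stated in full; the proofs are below) =====
def Claim_equal_automata_Relop : Prop := ∀ (input : String), Dom_automata_Relop input → Spec_automata_Relop input (automata_Relop input)

-- ===== LEMMAS AND PROOFS =====

-- the trap state absorbs every further character
theorem foldl_delta_trap (l : List Char) : l.foldl delta (-1) = -1 := by
  induction l with
  | nil => rfl
  | cons c t ih => simpa [delta] using ih

-- state 3 leads to trap on any further character
theorem foldl_delta_three (c : Char) (t : List Char) :
    (c :: t).foldl delta 3 = -1 := by
  simp [delta, foldl_delta_trap]

-- ===== VERDICT (by name: the statement is the Claim_ definition above) =====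
theorem automata_Relop_spec : Claim_equal_automata_Relop := by
  intro input _
  unfold Spec_automata_Relop automata_Relop automata_Relop_alt
  match h : input.toList with
  | [] => simp
  | [c] =>
    by_cases h1 : c = '>' <;> by_cases h2 : c = '<' <;>
    by_cases h3 : c = '=' <;> by_cases h4 : c = '!' <;>
    simp_all [delta]
  | [c, d] =>
    by_cases h1 : c = '>' <;> by_cases h2 : c = '<' <;>
    by_cases h3 : c = '=' <;> by_cases h4 : c = '!' <;>
    by_cases h5 : d = '=' <;>
    simp_all [delta]
  | c :: d :: e :: t =>
    have hstate : (c :: d :: e :: t).foldl delta 0 = -1 := by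
      have h2 : [c, d].foldl delta 0 = 3 ∨ [c, d].foldl delta 0 = -1 := by
        by_cases h1 : c = '>' <;> by_cases h2 : c = '<' <;>
        by_cases h3 : c = '=' <;> by_cases h4 : c = '!' <;>
        by_cases h5 : d = '=' <;> simp_all [delta]
      show (e :: t).foldl delta ([c, d].foldl delta 0) = -1
      rcases h2 with h2 | h2 <;> rw [h2]
      · exact foldl_delta_three e t
      · exact foldl_delta_trap (e :: t)
    rw [hstate]
    simp
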